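-- pv_equiv track=rewrite | github.com/BJWOODS/GEDI_Model_Fitting | GEDI_model_fitting.py | extend_to_match
-- ===== SOURCE A (Python) =====
-- def extend_to_match(s1, s2):
--     """
--
--
--     Parameters
--     ----------
--     s1 : list of floats
--         the signal to be extended
--     s2 : list of floats
--         the signal to match
--
--     Returns
--     -------
--     the extended version of s1 to match the length of s2
--
--     """
--
--     diff = len(s2) - len(s1)
--     for i in range(diff):
--         if i % 2 == 0:
--             s1 = [s1[0]] + s1
--         else:
--             s1 = s1 + [s1[-1]]
--
--     return s1
-- ===== SOURCE B (Python) =====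
-- def extend_to_match(s1, s2):
--     def pad(xs, d):
--         if d <= 0:
--             return xs
--         if d == 1:
--             return [xs[0]] + xs
--         return [xs[0]] + pad(xs, d - 2) + [xs[-1]]
--     return pad(s1, len(s2) - len(s1))
-- ===== Notes on version B (the rewrite author's own statement) =====
-- stated objective: alternative
-- what changed: A rebuilds the whole list once per missing element in a loop alternating prepend/append; B recurses on the deficit two at a time, adding one head copy and one tail copy per step (one extra head copy when odd), never re-reading the growing list.
import Mathlib
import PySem

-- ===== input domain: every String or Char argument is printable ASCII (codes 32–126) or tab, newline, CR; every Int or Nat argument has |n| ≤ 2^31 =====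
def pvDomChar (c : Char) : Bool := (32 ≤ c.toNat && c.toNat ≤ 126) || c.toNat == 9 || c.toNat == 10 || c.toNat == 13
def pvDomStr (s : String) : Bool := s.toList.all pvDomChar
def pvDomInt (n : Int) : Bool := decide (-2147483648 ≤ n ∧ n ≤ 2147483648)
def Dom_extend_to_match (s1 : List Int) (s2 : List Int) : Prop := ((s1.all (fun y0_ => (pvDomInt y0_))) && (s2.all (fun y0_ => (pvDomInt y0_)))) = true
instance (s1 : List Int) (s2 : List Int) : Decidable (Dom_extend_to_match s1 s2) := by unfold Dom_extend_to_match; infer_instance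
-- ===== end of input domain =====

-- B replaces A's per-element rebuild loop by a recursion on the deficit two at a time,
-- adding one head copy and one tail copy per step (objective: alternative).

-- ===== PORT A =====
-- A's loop over range(diff), rebinding s1 each iteration; s1[0]/s1[-1] via pyGet?
-- (the .getD 0 default is never reached inside Pre_, which excludes the IndexError inputs).
def extend_to_match (s1 : List Int) (s2 : List Int) : List Int :=
  let diff : Int := (s2.length : Int) - (s1.length : Int)
  (PySem.List.pyRange 0 diff 1).foldl
    (fun acc i =>
      if i % 2 == 0 then ((PySem.List.pyGet? acc 0).getD 0) :: acc
      else acc ++ [((PySem.List.pyGet? acc (-1)).getD 0)])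
    s1

-- ===== PORT B =====
-- Source B's helper pad(xs, d): d ≤ 0 → xs; d = 1 → one head copy; else one head copy,
-- recurse on d-2, one tail copy.  The Int argument d is handled by recursing on d.toNat
-- (pad's 'd <= 0' base case is exactly toNat = 0).
def pvPad (xs : List Int) : Nat → List Int
  | 0 => xs
  | 1 => ((PySem.List.pyGet? xs 0).getD 0) :: xs
  | Nat.succ (Nat.succ d) =>
      ((PySem.List.pyGet? xs 0).getD 0) :: (pvPad xs d ++ [((PySem.List.pyGet? xs (-1)).getD 0)])

def extend_to_match_alt (s1 : List Int) (s2 : List Int) : List Int :=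
  pvPad s1 ((s2.length : Int) - (s1.length : Int)).toNat

-- ===== PRECONDITION & SPEC =====
-- Pre_ excludes exactly the inputs where A raises IndexError: s1 empty while s2 is longer
-- (B raises the same IndexError there).
def Pre_extend_to_match (s1 : List Int) (s2 : List Int) : Prop :=
  s1 ≠ [] ∨ s2.length ≤ s1.length
instance (s1 : List Int) (s2 : List Int) : Decidable (Pre_extend_to_match s1 s2) := by
  unfold Pre_extend_to_match; infer_instance

def pvWitness_extend_to_match : List Int × List Int := ([1, 2], [0, 0, 0, 0, 0])

def Spec_extend_to_match (s1 : List Int) (s2 : List Int) (out : List Int) : Prop := out = extend_to_match_alt s1 s2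
instance (s1 : List Int) (s2 : List Int) (out : List Int) : Decidable (Spec_extend_to_match s1 s2 out) := by unfold Spec_extend_to_match; infer_instance

-- ===== CLAIM (what is proved, stated in full; the proofs are below) =====
def Claim_equal_extend_to_match : Prop := ∀ (s1 : List Int) (s2 : List Int), Dom_extend_to_match s1 s2 → Pre_extend_to_match s1 s2 → Spec_extend_to_match s1 s2 (extend_to_match s1 s2)

-- ===== LEMMAS AND PROOFS =====

-- replicate k a ++ a :: u = a :: (replicate k a ++ u)
theorem pv_replicate_cons (k : Nat) (a : Int) (u : List Int) :
    List.replicate k a ++ a :: u = a :: (List.replicate k a ++ u) := by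
  induction k with
  | zero => simp
  | succ k ih => simp [List.replicate_succ, ih]

-- A's loop invariant: after n iterations starting from a :: t, the state is the final shape
theorem pv_loop_eq (a : Int) (t : List Int) (n : Nat) :
    (PySem.List.pyRange 0 (n : Int) 1).foldl
      (fun acc i =>
        if i % 2 == 0 then ((PySem.List.pyGet? acc 0).getD 0) :: acc
        else acc ++ [((PySem.List.pyGet? acc (-1)).getD 0)])
      (a :: t)
    = List.replicate ((n + 1) / 2) a ++ (a :: t)
        ++ List.replicate (n / 2) ((a :: t).getLast (by simp)) := by
  induction n with
  | zero => simp
  | succ n ih =>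
    have hsplit : PySem.List.pyRange 0 ((n : Int) + 1) 1
        = PySem.List.pyRange 0 (n : Int) 1 ++ [(n : Int)] :=
      PySem.List.pyRange_one_succ_right (by positivity)
    push_cast
    rw [hsplit, List.foldl_append, ih]
    set b := (a :: t).getLast (by simp) with hb
    have hhead : List.replicate ((n + 1) / 2) a ++ (a :: t) ++ List.replicate (n / 2) b
        = a :: (List.replicate ((n + 1) / 2) a ++ (t ++ List.replicate (n / 2) b)) := by
      rw [List.append_assoc, List.cons_append, pv_replicate_cons]
    rcases Nat.even_or_odd n with he | ho
    · -- i = n even: prepend the head, which is a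
      have hn2 : n % 2 = 0 := Nat.even_iff.mp he
      have hmod : ((n : Int)) % 2 = 0 := by omega
      simp only [List.foldl_cons, List.foldl_nil, hmod]
      rw [hhead]
      simp only [beq_self_eq_true, if_true, PySem.List.pyGet?_zero_cons, Option.getD_some]
      rw [show (n + 1 + 1) / 2 = (n + 1) / 2 + 1 from by omega,
          show (n + 1) / 2 = n / 2 from by omega]
      rw [List.append_assoc, List.cons_append, pv_replicate_cons]
      simp [List.replicate_succ]
    · -- i = n odd: append the last element, which is b
      have hn2 : n % 2 = 1 := Nat.odd_iff.mp ho
      have hmod : ¬ (((n : Int)) % 2 == 0) = true := by simp only [beq_iff_eq]; omega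
      simp only [List.foldl_cons, List.foldl_nil, hmod]
      have hlast : PySem.List.pyGet?
          (List.replicate ((n + 1) / 2) a ++ (a :: t) ++ List.replicate (n / 2) b) (-1)
          = some b := by
        rw [PySem.List.pyGet?_neg_one]
        rcases Nat.eq_zero_or_pos (n / 2) with h0 | hpos
        · rw [h0]
          simp only [List.replicate_zero, List.append_nil]
          rw [List.getLast?_append_of_ne_nil _ (by simp), hb,
              List.getLast?_eq_some_getLast (by simp)]
        · rw [List.getLast?_append_of_ne_nil _ (by simp; omega)]
          obtain ⟨k, hk⟩ : ∃ k, n / 2 = k + 1 := ⟨n / 2 - 1, by omega⟩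
          rw [hk, List.replicate_succ', List.getLast?_concat]
      rw [hlast]
      simp only [Option.getD_some]
      rw [show (n + 1 + 1) / 2 = (n + 1) / 2 from by omega,
          show (n + 1) / 2 = n / 2 + 1 from by omega]
      simp [List.replicate_succ', List.append_assoc]

-- B's recursion computes the same final shape
theorem pv_pad_eq (a : Int) (t : List Int) (n : Nat) :
    pvPad (a :: t) n
    = List.replicate ((n + 1) / 2) a ++ (a :: t)
        ++ List.replicate (n / 2) ((a :: t).getLast (by simp)) := by
  induction n using Nat.twoStepInduction with
  | zero => simp [pvPad]
  | one => simp [pvPad, List.replicate_succ]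
  | more n ih _ =>
    have hget0 : (PySem.List.pyGet? (a :: t) 0).getD 0 = a := by
      simp
    have hgetl : (PySem.List.pyGet? (a :: t) (-1)).getD 0 = (a :: t).getLast (by simp) := by
      rw [PySem.List.pyGet?_neg_one, List.getLast?_eq_some_getLast (by simp)]
      simp
    rw [pvPad, hget0, hgetl, ih]
    rw [show (n + 2 + 1) / 2 = (n + 1) / 2 + 1 from by omega,
        show (n + 2) / 2 = n / 2 + 1 from by omega]
    simp [List.replicate_succ, List.append_assoc]
    simpa using pv_replicate_cons (n / 2) ((a :: t).getLast (by simp)) []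

-- ===== VERDICT (by name: the statement is the Claim_ definition above) =====
theorem extend_to_match_spec : Claim_equal_extend_to_match := by
  intro s1 s2 _ hpre
  unfold Spec_extend_to_match extend_to_match extend_to_match_alt
  by_cases hle : (s2.length : Int) - (s1.length : Int) ≤ 0
  · have h1 : PySem.List.pyRange 0 ((s2.length : Int) - (s1.length : Int)) 1 = [] :=
      PySem.List.pyRange_one_eq_nil (by omega)
    have h2 : ((s2.length : Int) - (s1.length : Int)).toNat = 0 := by omega
    simp [h1, h2, pvPad]
  · obtain ⟨a, t, rfl⟩ : ∃ a t, s1 = a :: t := by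
      rcases s1 with _ | ⟨a, t⟩
      · rcases hpre with h | h
        · exact absurd rfl h
        · exfalso
          have h0 : s2.length = 0 := by simpa using h
          simp [h0] at hle
      · exact ⟨a, t, rfl⟩
    obtain ⟨n, hn⟩ : ∃ n : Nat, (s2.length : Int) - ((a :: t).length : Int) = (n : Int) :=
      ⟨((s2.length : Int) - ((a :: t).length : Int)).toNat, by omega⟩
    rw [hn, pv_loop_eq a t n, Int.toNat_natCast, pv_pad_eq a t n]
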